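-- pv_equiv track=rewrite | github.com/HappyButter-WFiIS/graphs-and-their-uses | lab02/lab02_6.py | isHamiltonianPathFromVertex
-- ===== SOURCE A (Python) =====
-- def isHamiltonianPathFromVertex(G, visited, curr_vertex) -> int:
--     visited[curr_vertex] = 1
--     if not 0 in visited:
--         return 1
--     for v in G[curr_vertex]:
--         if not visited[v]:
--             if isHamiltonianPathFromVertex(G,visited,v): return 1
--     visited[curr_vertex] = 0
--     return 0
-- ===== SOURCE B (Python) =====
-- def isHamiltonianPathFromVertex(G, visited, curr_vertex) -> int:
--     # Iterative re-implementation: explicit-stack DFS instead of recursion.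
--     visited[curr_vertex] = 1
--     if 0 not in visited:
--         return 1
--     stack = [(curr_vertex, G[curr_vertex])]
--     while stack:
--         c, ns = stack.pop()
--         if not ns:
--             visited[c] = 0
--             continue
--         w, rest = ns[0], ns[1:]
--         if visited[w]:
--             stack.append((c, rest))
--             continue
--         visited[w] = 1
--         if 0 not in visited:
--             return 1
--         stack.append((c, rest))
--         stack.append((w, G[w]))
--     return 0
-- ===== Notes on version B (the rewrite author's own statement) =====
-- stated objective: alternative
-- what changed: The recursive backtracking search is replaced by an iterative DFS over an explicit stack of (vertex, remaining-neighbours) frames, with the same visit order and the same in-place marking/unmarking of visited.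
-- outside the precondition, e.g. on isHamiltonianPathFromVertex({0: [1], 1: [5]}, [0, 0], 0): A returns 1, B returns 1
import Mathlib
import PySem

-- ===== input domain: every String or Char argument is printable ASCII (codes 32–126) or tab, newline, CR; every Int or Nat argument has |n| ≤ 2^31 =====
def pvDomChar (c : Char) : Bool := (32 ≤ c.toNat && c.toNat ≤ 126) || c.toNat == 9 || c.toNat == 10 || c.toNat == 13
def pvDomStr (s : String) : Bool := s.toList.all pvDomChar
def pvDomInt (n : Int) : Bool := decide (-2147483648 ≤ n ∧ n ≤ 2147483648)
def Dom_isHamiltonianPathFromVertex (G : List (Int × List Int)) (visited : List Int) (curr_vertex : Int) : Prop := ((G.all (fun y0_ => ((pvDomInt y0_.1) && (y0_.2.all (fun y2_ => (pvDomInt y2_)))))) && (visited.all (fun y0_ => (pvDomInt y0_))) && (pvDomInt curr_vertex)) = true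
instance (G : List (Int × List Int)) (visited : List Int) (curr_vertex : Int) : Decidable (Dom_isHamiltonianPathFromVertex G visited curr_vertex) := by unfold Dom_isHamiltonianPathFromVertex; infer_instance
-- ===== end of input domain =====

-- B re-implements A's recursive backtracking as an explicit-stack DFS (same visits in the
-- same order, same in-place marking of `visited`); equivalence of the RETURN value is proved,
-- and both implementations perform the same mutations of `visited` in Python.

-- ===== PORT A =====
-- A is a recursion on `visited`'s mutable state; the port threads `visited` explicitly and
-- uses a fuel argument (visited.length + 2, always sufficient under Pre_, proved below).
-- `hamLoopA` is the `for v in G[curr_vertex]` loop, with `recur` the recursive call.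
def hamLoopA (recur : List Int → Int → Option (List Int × Int))
    (v : List Int) (c : Int) : List Int → Option (List Int × Int)
  | [] =>
    -- visited[curr_vertex] = 0; return 0
    match PySem.List.pySet? v c 0 with
    | none => none
    | some v0 => some (v0, 0)
  | w :: rest =>
    match PySem.List.pyGet? v w with
    | none => none
    | some x =>
      if x = 0 then
        match recur v w with
        | none => none
        | some (v2, r) => if r ≠ 0 then some (v2, 1) else hamLoopA recur v2 c rest
      else hamLoopA recur v c rest

def hamGoA (G : List (Int × List Int)) : Nat → List Int → Int → Option (List Int × Int)
  | 0, _, _ => none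
  | f + 1, v, c =>
    match PySem.List.pySet? v c 1 with        -- visited[curr_vertex] = 1
    | none => none
    | some v1 =>
      if v1.contains 0 then                   -- `not 0 in visited` failed
        match (PySem.Dict.mk G).get? c with   -- G[curr_vertex]
        | none => none
        | some ns => hamLoopA (hamGoA G f) v1 c ns
      else some (v1, 1)

def isHamiltonianPathFromVertex (G : List (Int × List Int)) (visited : List Int) (curr_vertex : Int) : Int :=
  match hamGoA G (visited.length + 2) visited curr_vertex with
  | some (_, r) => r
  | none => 0

-- ===== PORT B =====
-- Source B: explicit stack of frames (vertex, remaining neighbour list); pop/inspect/push loop.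
-- The while loop is run with a fuel that is a precomputed strict upper bound on the number
-- of iterations (a potential over the zero count of `visited` and the stack, proved to
-- decrease at every step in the lemmas below the claim block); the fuel never runs out.

-- largest adjacency-list length in G (used only by the iteration bound)
def hamMaxAdj (G : List (Int × List Int)) : Nat :=
  G.foldr (fun p m => max p.2.length m) 0

-- potential of a machine state: frames weighted by (m+2)^(z+depth+1), z = zeros in visited
def hamPot (m : Nat) : Nat → List (Int × List Int) → Nat
  | _, [] => 0
  | z, (_, ns) :: S => ns.length * (m + 2) ^ (z + 1) + 1 + hamPot m (z + 1) S

def stepBF (G : List (Int × List Int)) : Nat → List Int → List (Int × List Int) →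
    Option (List Int × Int)
  | 0, _, _ => none                                     -- fuel exhausted (never reached)
  | f + 1, v, S =>
    match S with
    | [] => some (v, 0)                                 -- while-loop ended: return 0
    | (c, []) :: S' =>                                  -- frame exhausted: backtrack
      match PySem.List.pySet? v c 0 with
      | none => none
      | some v0 => stepBF G f v0 S'
    | (c, w :: rest) :: S' =>
      match PySem.List.pyGet? v w with                  -- visited[w]
      | none => none
      | some x =>
        if x = 0 then
          match PySem.List.pySet? v w 1 with            -- visited[w] = 1
          | none => none
          | some v1 =>
            if v1.contains 0 then
              match (PySem.Dict.mk G).get? w with       -- G[w]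
              | none => none
              | some nsw => stepBF G f v1 ((w, nsw) :: (c, rest) :: S')
            else some (v1, 1)
        else stepBF G f v ((c, rest) :: S')

-- run the machine with its (sufficient) fuel
def hamRun (G : List (Int × List Int)) (v : List Int) (S : List (Int × List Int)) :
    Option (List Int × Int) :=
  stepBF G (hamPot (hamMaxAdj G) (v.count 0) S + 1) v S

def isHamiltonianPathFromVertex_alt (G : List (Int × List Int)) (visited : List Int) (curr_vertex : Int) : Int :=
  match PySem.List.pySet? visited curr_vertex 1 with
  | none => 0
  | some v1 =>
    if v1.contains 0 then
      match (PySem.Dict.mk G).get? curr_vertex with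
      | none => 0
      | some ns =>
        match hamRun G v1 [(curr_vertex, ns)] with
        | some (_, r) => r
        | none => 0
    else 1

-- ===== PRECONDITION & SPEC =====
-- Pre_ excludes exactly the inputs on which A raises IndexError/KeyError, slightly
-- over-approximated: it requires every listed neighbour to be a valid index into `visited`
-- and a key of G even when the search happens to return before touching it.
def Pre_isHamiltonianPathFromVertex (G : List (Int × List Int)) (visited : List Int) (curr_vertex : Int) : Prop :=
  0 < visited.length ∧
  PySem.Raise.InRange visited.length curr_vertex ∧
  ((PySem.List.pySetD visited curr_vertex 1).contains 0 = true →
    ((PySem.Dict.mk G).get? curr_vertex).isSome = true ∧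
    ∀ p ∈ G, ∀ w ∈ p.2,
      PySem.Raise.InRange visited.length w ∧ ((PySem.Dict.mk G).get? w).isSome = true)

instance (G : List (Int × List Int)) (visited : List Int) (curr_vertex : Int) : Decidable (Pre_isHamiltonianPathFromVertex G visited curr_vertex) := by
  unfold Pre_isHamiltonianPathFromVertex PySem.Raise.InRange; infer_instance

def pvWitness_isHamiltonianPathFromVertex : (List (Int × List Int)) × List Int × Int :=
  ([(0, [1]), (1, [0])], [0, 0], 0)

def Spec_isHamiltonianPathFromVertex (G : List (Int × List Int)) (visited : List Int) (curr_vertex : Int) (out : Int) : Prop := out = isHamiltonianPathFromVertex_alt G visited curr_vertex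
instance (G : List (Int × List Int)) (visited : List Int) (curr_vertex : Int) (out : Int) : Decidable (Spec_isHamiltonianPathFromVertex G visited curr_vertex out) := by unfold Spec_isHamiltonianPathFromVertex; infer_instance

-- ===== CLAIM (what is proved, stated in full; the proofs are below) =====
def Claim_equal_isHamiltonianPathFromVertex : Prop := ∀ (G : List (Int × List Int)) (visited : List Int) (curr_vertex : Int), Dom_isHamiltonianPathFromVertex G visited curr_vertex → Pre_isHamiltonianPathFromVertex G visited curr_vertex → Spec_isHamiltonianPathFromVertex G visited curr_vertex (isHamiltonianPathFromVertex G visited curr_vertex)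

-- ===== LEMMAS AND PROOFS =====

-- index arithmetic on the PySem primitives
theorem hamIdx_lt {n : Nat} {i : Int} {j : Nat} (h : PySem.List.pyIdx? n i = some j) : j < n := by
  unfold PySem.List.pyIdx? at h
  split_ifs at h <;> simp_all <;> omega

theorem hamSet?_eq {α : Type} {xs ys : List α} {i : Int} {a : α}
    (h : PySem.List.pySet? xs i a = some ys) :
    ∃ j, PySem.List.pyIdx? xs.length i = some j ∧ j < xs.length ∧ ys = xs.set j a := by
  unfold PySem.List.pySet? at h
  cases hj : PySem.List.pyIdx? xs.length i with
  | none => rw [hj] at h; simp at h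
  | some j =>
    rw [hj] at h
    simp at h
    exact ⟨j, rfl, hamIdx_lt hj, h.symm⟩

theorem hamGet?_eq {α : Type} {xs : List α} {i : Int} {a : α}
    (h : PySem.List.pyGet? xs i = some a) :
    ∃ j, PySem.List.pyIdx? xs.length i = some j ∧ j < xs.length ∧ xs[j]? = some a := by
  unfold PySem.List.pyGet? at h
  cases hj : PySem.List.pyIdx? xs.length i with
  | none => rw [hj] at h; simp at h
  | some j => rw [hj] at h; exact ⟨j, rfl, hamIdx_lt hj, h⟩

-- setting a slot to 0 creates at most one new zero
theorem hamCount_set_zero {v v0 : List Int} {c : Int}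
    (h : PySem.List.pySet? v c 0 = some v0) : v0.count 0 ≤ v.count 0 + 1 := by
  obtain ⟨j, _, hj, rfl⟩ := hamSet?_eq h
  rw [List.count_set hj]
  split_ifs <;> simp_all <;> omega

-- setting a zero slot to 1 removes exactly one zero
theorem hamCount_set_one {v v1 : List Int} {w : Int}
    (hg : PySem.List.pyGet? v w = some 0) (hs : PySem.List.pySet? v w 1 = some v1) :
    v1.count 0 + 1 = v.count 0 := by
  obtain ⟨j, hj1, hj, hv⟩ := hamGet?_eq hg
  obtain ⟨j', hj1', _, rfl⟩ := hamSet?_eq hs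
  rw [hj1] at hj1'
  cases hj1'
  have hvj : v[j] = 0 := by
    have := List.getElem?_eq_getElem hj
    rw [this] at hv; exact Option.some.inj hv
  rw [List.count_set hj]
  have hcnt : 1 ≤ v.count 0 := List.count_pos_iff.mpr (by
    exact hvj ▸ List.getElem_mem hj)
  simp [hvj]
  omega

theorem hamMaxAdj_bound {G : List (Int × List Int)} {p : Int × List Int} (h : p ∈ G) :
    p.2.length ≤ hamMaxAdj G := by
  induction G with
  | nil => cases h
  | cons q G ih =>
    rcases List.mem_cons.mp h with rfl | hm
    · simp [hamMaxAdj]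
    · have := ih hm
      unfold hamMaxAdj at this ⊢
      simp only [List.foldr]
      omega

theorem hamGet?_mem {G : List (Int × List Int)} {k : Int} {ns : List Int}
    (h : (PySem.Dict.mk G).get? k = some ns) : (k, ns) ∈ G :=
  PySem.Dict.mem_items_of_get?_eq_some _ h

theorem hamPot_mono (m : Nat) (S : List (Int × List Int)) :
    ∀ z z', z ≤ z' → hamPot m z S ≤ hamPot m z' S := by
  induction S with
  | nil => intro z z' _; simp [hamPot]
  | cons p S ih =>
    intro z z' h
    obtain ⟨c, ns⟩ := p
    simp only [hamPot]
    have h1 : (m + 2) ^ (z + 1) ≤ (m + 2) ^ (z' + 1) :=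
      Nat.pow_le_pow_right (by omega) (by omega)
    have h2 := ih (z + 1) (z' + 1) (by omega)
    have := Nat.mul_le_mul_left ns.length h1
    omega

-- the three strict decreases of the machine potential (pop / push / skip)
theorem hamPop_dec {v v0 : List Int} {c : Int}
    (hs : PySem.List.pySet? v c 0 = some v0) (m : Nat) (S' : List (Int × List Int)) :
    hamPot m (v0.count 0) S' < hamPot m (v.count 0) ((c, ([] : List Int)) :: S') := by
  have h0 := hamCount_set_zero hs
  calc hamPot m (v0.count 0) S'
      ≤ hamPot m (v.count 0 + 1) S' := hamPot_mono _ _ _ _ h0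
    _ < hamPot m (v.count 0) ((c, ([] : List Int)) :: S') := by simp [hamPot]

theorem hamPush_dec {G : List (Int × List Int)} {v v1 : List Int} {w : Int} {nsw : List Int}
    (hg : PySem.List.pyGet? v w = some 0) (hs : PySem.List.pySet? v w 1 = some v1)
    (hk : (PySem.Dict.mk G).get? w = some nsw) (c : Int) (rest : List Int)
    (S' : List (Int × List Int)) :
    hamPot (hamMaxAdj G) (v1.count 0) ((w, nsw) :: (c, rest) :: S')
      < hamPot (hamMaxAdj G) (v.count 0) ((c, w :: rest) :: S') := by
  have h1 : v1.count 0 + 1 = v.count 0 := hamCount_set_one hg hs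
  have hm : nsw.length ≤ hamMaxAdj G := hamMaxAdj_bound (hamGet?_mem hk)
  have hp : 1 ≤ (hamMaxAdj G + 2) ^ (v1.count 0 + 1) := Nat.one_le_pow _ _ (by omega)
  simp only [hamPot, ← h1]
  have e : v1.count 0 + 1 + 1 = v1.count 0 + 2 := by omega
  rw [e]
  have key : nsw.length * (hamMaxAdj G + 2) ^ (v1.count 0 + 1) + 1
      < (hamMaxAdj G + 2) ^ (v1.count 0 + 2) := by
    have hb : nsw.length * (hamMaxAdj G + 2) ^ (v1.count 0 + 1)
        ≤ hamMaxAdj G * (hamMaxAdj G + 2) ^ (v1.count 0 + 1) :=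
      Nat.mul_le_mul_right _ hm
    have hpow : (hamMaxAdj G + 2) ^ (v1.count 0 + 2)
        = (hamMaxAdj G + 2) * (hamMaxAdj G + 2) ^ (v1.count 0 + 1) := by ring
    rw [hpow]
    nlinarith
  simp only [List.length_cons]
  nlinarith [key]

theorem hamSkip_dec (m z : Nat) (c w : Int) (rest : List Int)
    (S' : List (Int × List Int)) :
    hamPot m z ((c, rest) :: S') < hamPot m z ((c, w :: rest) :: S') := by
  simp [hamPot]

-- the machine's answer does not depend on the fuel, as long as it exceeds the potential
theorem stepBF_irrel (G : List (Int × List Int)) :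
    ∀ f f' : Nat, ∀ (v : List Int) (S : List (Int × List Int)),
      hamPot (hamMaxAdj G) (v.count 0) S < f →
      hamPot (hamMaxAdj G) (v.count 0) S < f' →
      stepBF G f v S = stepBF G f' v S := by
  intro f
  induction f using Nat.strong_induction_on with
  | _ f ih =>
    intro f' v S hf hf'
    obtain ⟨g, rfl⟩ : ∃ g, f = g + 1 := ⟨f - 1, by omega⟩
    obtain ⟨g', rfl⟩ : ∃ g'', f' = g'' + 1 := ⟨f' - 1, by omega⟩
    cases S with
    | nil => rfl
    | cons fr S' =>
      obtain ⟨c, ns⟩ := fr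
      cases ns with
      | nil =>
        simp only [stepBF]
        cases hs : PySem.List.pySet? v c 0 with
        | none => rfl
        | some v0 =>
          have hd := hamPop_dec hs (hamMaxAdj G) S'
          exact ih g (by omega) g' v0 S' (by omega) (by omega)
      | cons w rest =>
        simp only [stepBF]
        cases hg : PySem.List.pyGet? v w with
        | none => rfl
        | some x =>
          dsimp only
          by_cases hx : x = 0
          · simp only [if_pos hx]
            cases hset : PySem.List.pySet? v w 1 with
            | none => rfl
            | some v1 =>
              dsimp only
              by_cases hcont : v1.contains 0
              · simp only [if_pos hcont]
                cases hk : (PySem.Dict.mk G).get? w with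
                | none => rfl
                | some nsw =>
                  have hd := hamPush_dec (hx ▸ hg) hset hk c rest S'
                  exact ih g (by omega) g' v1 _ (by omega) (by omega)
              · simp only [if_neg hcont]
          · simp only [if_neg hx]
            have hd := hamSkip_dec (hamMaxAdj G) (v.count 0) c w rest S'
            exact ih g (by omega) g' v _ (by omega) (by omega)

-- single-step unfoldings of hamRun
theorem hamRun_nil (G : List (Int × List Int)) (v : List Int) :
    hamRun G v [] = some (v, 0) := rfl

theorem hamRun_pop (G : List (Int × List Int)) {v v0 : List Int} {c : Int}
    (hs : PySem.List.pySet? v c 0 = some v0) (S' : List (Int × List Int)) :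
    hamRun G v ((c, ([] : List Int)) :: S') = hamRun G v0 S' := by
  have hd := hamPop_dec hs (hamMaxAdj G) S'
  have h1 : hamRun G v ((c, ([] : List Int)) :: S')
      = stepBF G (hamPot (hamMaxAdj G) (v.count 0) ((c, ([] : List Int)) :: S')) v0 S' := by
    unfold hamRun
    simp only [stepBF]
    rw [hs]
  rw [h1]
  unfold hamRun
  exact stepBF_irrel G _ _ v0 S' (by omega) (by omega)

theorem hamRun_skip (G : List (Int × List Int)) {v : List Int} {w : Int} {x : Int}
    (hg : PySem.List.pyGet? v w = some x) (hx : ¬ x = 0) (c : Int) (rest : List Int)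
    (S' : List (Int × List Int)) :
    hamRun G v ((c, w :: rest) :: S') = hamRun G v ((c, rest) :: S') := by
  have hd := hamSkip_dec (hamMaxAdj G) (v.count 0) c w rest S'
  have h1 : hamRun G v ((c, w :: rest) :: S')
      = stepBF G (hamPot (hamMaxAdj G) (v.count 0) ((c, w :: rest) :: S')) v ((c, rest) :: S') := by
    unfold hamRun
    simp only [stepBF]
    rw [hg]
    dsimp only
    rw [if_neg hx]
  rw [h1]
  unfold hamRun
  exact stepBF_irrel G _ _ v _ (by omega) (by omega)

theorem hamRun_push (G : List (Int × List Int)) {v v1 : List Int} {w : Int} {nsw : List Int}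
    (hg : PySem.List.pyGet? v w = some 0) (hset : PySem.List.pySet? v w 1 = some v1)
    (hcont : v1.contains 0 = true) (hk : (PySem.Dict.mk G).get? w = some nsw)
    (c : Int) (rest : List Int) (S' : List (Int × List Int)) :
    hamRun G v ((c, w :: rest) :: S') = hamRun G v1 ((w, nsw) :: (c, rest) :: S') := by
  have hd := hamPush_dec hg hset hk c rest S'
  have h1 : hamRun G v ((c, w :: rest) :: S')
      = stepBF G (hamPot (hamMaxAdj G) (v.count 0) ((c, w :: rest) :: S')) v1
          ((w, nsw) :: (c, rest) :: S') := by
    unfold hamRun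
    simp only [stepBF]
    rw [hg]
    dsimp only
    rw [if_pos rfl, hset]
    dsimp only
    rw [if_pos hcont, hk]
  rw [h1]
  unfold hamRun
  exact stepBF_irrel G _ _ v1 _ (by omega) (by omega)

theorem hamRun_found (G : List (Int × List Int)) {v v1 : List Int} {w : Int}
    (hg : PySem.List.pyGet? v w = some 0) (hset : PySem.List.pySet? v w 1 = some v1)
    (hcont : ¬ v1.contains 0 = true) (c : Int) (rest : List Int)
    (S' : List (Int × List Int)) :
    hamRun G v ((c, w :: rest) :: S') = some (v1, 1) := by
  unfold hamRun
  simp only [stepBF]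
  rw [hg]
  dsimp only
  rw [if_pos rfl, hset]
  dsimp only
  rw [if_neg hcont]


-- index arithmetic: an in-range index can always be set / read
theorem hamIdx_isSome {n : Nat} {i : Int} (h : PySem.Raise.InRange n i) :
    ∃ j, PySem.List.pyIdx? n i = some j := by
  obtain ⟨h1, h2⟩ := h
  unfold PySem.List.pyIdx?
  split_ifs <;> simp_all <;> omega

theorem hamSet?_isSome {α : Type} (xs : List α) {i : Int} (a : α)
    (h : PySem.Raise.InRange xs.length i) :
    ∃ ys, PySem.List.pySet? xs i a = some ys := by
  obtain ⟨j, hj⟩ := hamIdx_isSome h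
  exact ⟨xs.set j a, by simp [PySem.List.pySet?, hj]⟩

-- set-then-restore: if slot c held 0, writing 1 then 0 restores the list
theorem hamSet_restore {v v1 v' : List Int} {c : Int}
    (hg : PySem.List.pyGet? v c = some 0)
    (h1 : PySem.List.pySet? v c 1 = some v1)
    (h0 : PySem.List.pySet? v1 c 0 = some v') : v' = v := by
  obtain ⟨j, hj1, hj, hv⟩ := hamGet?_eq hg
  obtain ⟨j2, hj2, _, rfl⟩ := hamSet?_eq h1
  rw [hj1] at hj2; cases hj2
  obtain ⟨j3, hj3, _, rfl⟩ := hamSet?_eq h0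
  rw [List.length_set] at hj3
  rw [hj1] at hj3; cases hj3
  have hvj : v[j] = 0 := by
    have := List.getElem?_eq_getElem hj
    rw [this] at hv; exact Option.some.inj hv
  rw [List.set_set]
  exact hvj ▸ List.set_getElem_self ..

-- RESTORATION: a failed call leaves `visited` exactly as it found it (slot c held 0)
theorem hamResto (G : List (Int × List Int)) :
    ∀ f : Nat,
      (∀ v c v', PySem.List.pyGet? v c = some 0 →
        hamGoA G f v c = some (v', 0) → v' = v) ∧
      (∀ ns v c v', hamLoopA (hamGoA G f) v c ns = some (v', 0) →
        PySem.List.pySet? v c 0 = some v') := by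
  intro f
  induction f with
  | zero =>
    refine ⟨fun v c v' _ h => by simp [hamGoA] at h, ?_⟩
    intro ns
    induction ns with
    | nil =>
      intro v c v' h
      unfold hamLoopA at h
      cases hs : PySem.List.pySet? v c 0 <;> rw [hs] at h <;> (try dsimp only at h) <;> simp_all
    | cons w rest ih =>
      intro v c v' h
      unfold hamLoopA at h
      cases hg : PySem.List.pyGet? v w <;> rw [hg] at h <;> (try dsimp only at h)
      · simp at h
      · rename_i x
        by_cases hx : x = 0
        · rw [if_pos hx] at h
          simp [hamGoA] at h
        · rw [if_neg hx] at h
          exact ih _ _ _ h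
  | succ f ihf =>
    obtain ⟨_, ihLoop⟩ := ihf
    have go : ∀ v c v', PySem.List.pyGet? v c = some 0 →
        hamGoA G (f + 1) v c = some (v', 0) → v' = v := by
      intro v c v' hg h
      simp only [hamGoA] at h
      cases h1 : PySem.List.pySet? v c 1 <;> rw [h1] at h <;> (try dsimp only at h)
      · simp at h
      · rename_i v1
        by_cases hc1 : v1.contains 0 <;> [rw [if_pos hc1] at h; rw [if_neg hc1] at h]
        · cases hk : (PySem.Dict.mk G).get? c <;> rw [hk] at h <;> (try dsimp only at h)
          · simp at h
          · exact hamSet_restore hg h1 (ihLoop _ _ _ _ h)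
        · simp at h
    refine ⟨go, ?_⟩
    intro ns
    induction ns with
    | nil =>
      intro v c v' h
      unfold hamLoopA at h
      cases hs : PySem.List.pySet? v c 0 <;> rw [hs] at h <;> (try dsimp only at h) <;> simp_all
    | cons w rest ih =>
      intro v c v' h
      unfold hamLoopA at h
      cases hg : PySem.List.pyGet? v w <;> rw [hg] at h <;> (try dsimp only at h)
      · simp at h
      · rename_i x
        by_cases hx : x = 0 <;> [rw [if_pos hx] at h; rw [if_neg hx] at h]
        · cases hr : hamGoA G (f + 1) v w <;> rw [hr] at h
          · simp at h
          · rename_i p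
            obtain ⟨v2, r2⟩ := p
            dsimp only at h
            by_cases hr2 : r2 = 0
            · subst hr2
              rw [if_neg (by simp)] at h
              have hv2 : v2 = v := go v w v2 (hx ▸ hg) hr
              exact hv2 ▸ ih _ _ _ h
            · rw [if_pos hr2] at h
              simp at h
        · exact ih _ _ _ h

-- an in-range index can be read
theorem hamGet?_isSome {α : Type} (xs : List α) {i : Int}
    (h : PySem.Raise.InRange xs.length i) : ∃ a, PySem.List.pyGet? xs i = some a := by
  obtain ⟨j, hj⟩ := hamIdx_isSome h
  have hlt := hamIdx_lt hj
  exact ⟨xs[j], by simp [PySem.List.pyGet?, hj, List.getElem?_eq_getElem hlt]⟩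

-- TOTALITY: with valid indices/keys and enough fuel, hamGoA returns
theorem hamTotal (G : List (Int × List Int)) (n : Nat)
    (hG : ∀ p ∈ G, ∀ w ∈ p.2,
      PySem.Raise.InRange n w ∧ ((PySem.Dict.mk G).get? w).isSome = true) :
    ∀ f : Nat,
      (∀ ns v c, v.length = n → PySem.Raise.InRange n c →
        (∀ w ∈ ns, PySem.Raise.InRange n w ∧ ((PySem.Dict.mk G).get? w).isSome = true) →
        v.count 0 ≤ f → ∃ out, hamLoopA (hamGoA G f) v c ns = some out) ∧
      (∀ v c v1, v.length = n → PySem.Raise.InRange n c →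
        ((PySem.Dict.mk G).get? c).isSome = true →
        PySem.List.pySet? v c 1 = some v1 → v1.count 0 ≤ f →
        ∃ out, hamGoA G (f + 1) v c = some out) := by
  have main : ∀ f : Nat,
      (∀ ns v c, v.length = n → PySem.Raise.InRange n c →
        (∀ w ∈ ns, PySem.Raise.InRange n w ∧ ((PySem.Dict.mk G).get? w).isSome = true) →
        v.count 0 ≤ f → ∃ out, hamLoopA (hamGoA G f) v c ns = some out) := by
    intro f
    induction f with
    | zero =>
      intro ns
      induction ns with
      | nil =>
        intro v c hlen hc _ _
        obtain ⟨v0, h0⟩ := hamSet?_isSome v (0 : Int) (hlen ▸ hc)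
        exact ⟨(v0, 0), by simp [hamLoopA, h0]⟩
      | cons w rest ih =>
        intro v c hlen hc hns hcnt
        obtain ⟨hw, _⟩ := hns w (List.mem_cons_self ..)
        obtain ⟨x, hg⟩ := hamGet?_isSome v (hlen ▸ hw)
        by_cases hx : x = 0
        · exfalso
          have : (0 : Int) ∈ v := PySem.List.mem_of_pyGet?_eq_some v (hx ▸ hg)
          have := List.count_pos_iff.mpr this
          omega
        · obtain ⟨out, hout⟩ := ih v c hlen hc (fun u hu => hns u (List.mem_cons_of_mem _ hu)) hcnt
          exact ⟨out, by simp [hamLoopA, hg, hx, hout]⟩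
    | succ f ihf =>
      intro ns
      induction ns with
      | nil =>
        intro v c hlen hc _ _
        obtain ⟨v0, h0⟩ := hamSet?_isSome v (0 : Int) (hlen ▸ hc)
        exact ⟨(v0, 0), by simp [hamLoopA, h0]⟩
      | cons w rest ih =>
        intro v c hlen hc hns hcnt
        obtain ⟨hw, hwkey⟩ := hns w (List.mem_cons_self ..)
        obtain ⟨x, hg⟩ := hamGet?_isSome v (hlen ▸ hw)
        by_cases hx : x = 0
        · -- recurse into w
          obtain ⟨v2, hset2⟩ := hamSet?_isSome v (1 : Int) (hlen ▸ hw)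
          have hdrop : v2.count 0 + 1 = v.count 0 := hamCount_set_one (hx ▸ hg) hset2
          -- fuel for the callee: hamGoA G (f+1)
          have hgo : ∃ out, hamGoA G (f + 1) v w = some out := by
            by_cases hcont : v2.contains 0
            · obtain ⟨ns2, hk2⟩ := Option.isSome_iff_exists.mp hwkey
              have hmem := hamGet?_mem hk2
              have hns2 : ∀ u ∈ ns2, PySem.Raise.InRange n u ∧
                  ((PySem.Dict.mk G).get? u).isSome = true := fun u hu => hG _ hmem u hu
              have hlen2 : v2.length = n := by
                obtain ⟨j, _, _, rfl⟩ := hamSet?_eq hset2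
                simp [hlen]
              obtain ⟨out, hout⟩ := ihf ns2 v2 w hlen2 hw hns2 (by omega)
              refine ⟨out, ?_⟩
              simp only [hamGoA]
              rw [hset2]
              dsimp only
              rw [if_pos hcont, hk2]
              exact hout
            · refine ⟨(v2, 1), ?_⟩
              simp only [hamGoA]
              rw [hset2]
              dsimp only
              rw [if_neg hcont]
          obtain ⟨⟨v3, r3⟩, hgo⟩ := hgo
          by_cases hr3 : r3 = 0
          · -- failed: visited restored, continue with rest
            have hv3 : v3 = v := (hamResto G (f + 1)).1 v w v3 (hx ▸ hg) (hr3 ▸ hgo)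
            obtain ⟨out, hout⟩ :=
              ih v c hlen hc (fun u hu => hns u (List.mem_cons_of_mem _ hu)) hcnt
            subst hr3
            exact ⟨out, by simp [hamLoopA, hg, hx, hgo, hv3, hout]⟩
          · exact ⟨(v3, 1), by simp [hamLoopA, hg, hx, hgo, hr3]⟩
        · obtain ⟨out, hout⟩ := ih v c hlen hc (fun u hu => hns u (List.mem_cons_of_mem _ hu)) hcnt
          exact ⟨out, by simp [hamLoopA, hg, hx, hout]⟩
  intro f
  refine ⟨main f, ?_⟩
  intro v c v1 hlen hc hkey hset hcnt
  by_cases hcont : v1.contains 0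
  · obtain ⟨ns, hk⟩ := Option.isSome_iff_exists.mp hkey
    have hmem := hamGet?_mem hk
    have hlen1 : v1.length = n := by
      obtain ⟨j, _, _, rfl⟩ := hamSet?_eq hset
      simp [hlen]
    obtain ⟨out, hout⟩ := main f ns v1 c hlen1 hc (fun u hu => hG _ hmem u hu) hcnt
    refine ⟨out, ?_⟩
    simp only [hamGoA]
    rw [hset]
    dsimp only
    rw [if_pos hcont, hk]
    exact hout
  · refine ⟨(v1, 1), ?_⟩
    simp only [hamGoA]
    rw [hset]
    dsimp only
    rw [if_neg hcont]

-- the empty-frame (backtrack) step of the machine agrees with A's loop exhaustion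
theorem hamSim_nil (G : List (Int × List Int))
    (recur : List Int → Int → Option (List Int × Int)) {v : List Int} {c : Int}
    {v' : List Int} {r : Int} (h : hamLoopA recur v c [] = some (v', r)) :
    r = 0 ∧ ∀ S, hamRun G v ((c, []) :: S) = hamRun G v' S := by
  unfold hamLoopA at h
  cases hs : PySem.List.pySet? v c 0 <;> rw [hs] at h <;> (try dsimp only at h)
  · simp at h
  · obtain ⟨rfl, rfl⟩ : v' = _ ∧ r = 0 := by simpa [eq_comm] using h
    exact ⟨rfl, fun S => hamRun_pop G hs S⟩

-- SIMULATION: the stack machine retraces A's loop exactly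
theorem hamSim (G : List (Int × List Int)) :
    ∀ f : Nat, ∀ ns v c v' r,
      hamLoopA (hamGoA G f) v c ns = some (v', r) →
      (r = 0 ∨ r = 1) ∧
      ∀ S, hamRun G v ((c, ns) :: S) =
        if r = 0 then hamRun G v' S else some (v', 1) := by
  intro f
  induction f with
  | zero =>
    intro ns
    induction ns with
    | nil =>
      intro v c v' r h
      obtain ⟨hr, hS⟩ := hamSim_nil G _ h
      exact ⟨Or.inl hr, fun S => by simp [hr, hS S]⟩
    | cons w rest ih =>
      intro v c v' r h
      unfold hamLoopA at h
      cases hg : PySem.List.pyGet? v w <;> rw [hg] at h <;> (try dsimp only at h)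
      · simp at h
      · rename_i x
        by_cases hx : x = 0 <;> [rw [if_pos hx] at h; rw [if_neg hx] at h]
        · simp [hamGoA] at h
        · obtain ⟨hr, hS⟩ := ih _ _ _ _ h
          refine ⟨hr, fun S => ?_⟩
          rw [hamRun_skip G hg hx]
          exact hS S
  | succ f ih =>
    intro ns
    induction ns with
    | nil =>
      intro v c v' r h
      obtain ⟨hr, hS⟩ := hamSim_nil G _ h
      exact ⟨Or.inl hr, fun S => by simp [hr, hS S]⟩
    | cons w rest ih_ns =>
      intro v c v' r h
      unfold hamLoopA at h
      cases hg : PySem.List.pyGet? v w <;> rw [hg] at h <;> (try dsimp only at h)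
      · simp at h
      · rename_i x
        by_cases hx : x = 0 <;> [rw [if_pos hx] at h; rw [if_neg hx] at h]
        · cases hrec : hamGoA G (f + 1) v w <;> rw [hrec] at h <;> (try dsimp only at h)
          · simp at h
          · rename_i p
            obtain ⟨v2, r2⟩ := p
            dsimp only at h
            -- unfold the callee's entry
            have hrec' := hrec
            simp only [hamGoA] at hrec'
            cases hset : PySem.List.pySet? v w 1 <;> rw [hset] at hrec' <;> (try dsimp only at hrec')
            · simp at hrec'
            · rename_i v1
              by_cases hcont : v1.contains 0 <;>
                [rw [if_pos hcont] at hrec'; rw [if_neg hcont] at hrec']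
              · cases hk : (PySem.Dict.mk G).get? w <;> rw [hk] at hrec' <;> (try dsimp only at hrec')
                · simp at hrec'
                · rename_i nsw
                  obtain ⟨hr2, hS2⟩ := ih nsw v1 w v2 r2 hrec'
                  rcases hr2 with hr2 | hr2
                  · -- child failed, parent continues on rest with v2
                    subst hr2
                    rw [if_neg (by simp)] at h
                    obtain ⟨hr, hS⟩ := ih_ns v2 c v' r h
                    refine ⟨hr, fun S => ?_⟩
                    rw [hamRun_push G (hx ▸ hg) hset hcont hk]
                    rw [hS2 ((c, rest) :: S)]
                    simp only [if_pos]
                    exact hS S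
                  · -- child succeeded
                    subst hr2
                    rw [if_pos (by norm_num)] at h
                    obtain ⟨rfl, rfl⟩ : v' = v2 ∧ r = 1 := by simpa [eq_comm] using h
                    refine ⟨Or.inr rfl, fun S => ?_⟩
                    rw [hamRun_push G (hx ▸ hg) hset hcont hk]
                    rw [hS2 ((c, rest) :: S)]
                    norm_num
              · -- immediate success inside the callee
                obtain ⟨rfl, rfl⟩ : v1 = v2 ∧ (1 : Int) = r2 := by simpa using hrec'
                rw [if_pos (by norm_num)] at h
                obtain ⟨rfl, rfl⟩ : v' = v1 ∧ r = 1 := by simpa [eq_comm] using h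
                refine ⟨Or.inr rfl, fun S => ?_⟩
                rw [hamRun_found G (hx ▸ hg) hset hcont]
                norm_num
        · obtain ⟨hr, hS⟩ := ih_ns _ _ _ _ h
          refine ⟨hr, fun S => ?_⟩
          rw [hamRun_skip G hg hx]
          exact hS S

-- ===== VERDICT (by name: the statement is the Claim_ definition above) =====
theorem isHamiltonianPathFromVertex_spec : Claim_equal_isHamiltonianPathFromVertex := by
  intro G visited curr _ hP
  obtain ⟨hn, hc, hcond⟩ := hP
  unfold Spec_isHamiltonianPathFromVertex
  obtain ⟨v1, hset⟩ := hamSet?_isSome visited (1 : Int) hc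
  by_cases hcont : v1.contains 0
  · -- real search: A's recursion vs B's machine
    have hPSD : PySem.List.pySetD visited curr 1 = v1 := by
      simp [PySem.List.pySetD, hset]
    obtain ⟨hkey, hG⟩ := hcond (by rw [hPSD]; exact hcont)
    have hcnt : v1.count 0 ≤ visited.length + 1 := by
      have h1 : v1.count 0 ≤ v1.length := List.count_le_length
      obtain ⟨j, _, _, rfl⟩ := hamSet?_eq hset
      simp at h1 ⊢
      omega
    obtain ⟨⟨vA, r⟩, hrun⟩ :=
      (hamTotal G visited.length hG (visited.length + 1)).2 visited curr v1 rfl hc hkey hset hcnt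
    have hrun' := hrun
    simp only [hamGoA, hset, hcont, if_true] at hrun'
    cases hk : (PySem.Dict.mk G).get? curr <;> rw [hk] at hrun' <;> (try dsimp only at hrun')
    · simp at hrun'
    · rename_i ns
      obtain ⟨hr, hS⟩ := hamSim G (visited.length + 1) ns v1 curr vA r hrun'
      have hA : isHamiltonianPathFromVertex G visited curr = r := by
        unfold isHamiltonianPathFromVertex
        have : visited.length + 2 = (visited.length + 1) + 1 := rfl
        rw [this, hrun]
      have hB : isHamiltonianPathFromVertex_alt G visited curr = r := by
        unfold isHamiltonianPathFromVertex_alt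
        rw [hset]
        simp only [hcont, if_true]
        rw [hk]
        dsimp only
        rw [hS []]
        rcases hr with hr | hr <;> subst hr
        · simp [hamRun_nil]
        · simp
      rw [hA, hB]
  · -- every vertex already visited after marking curr: both return 1
    have hA : isHamiltonianPathFromVertex G visited curr = 1 := by
      unfold isHamiltonianPathFromVertex
      have : visited.length + 2 = (visited.length + 1) + 1 := rfl
      rw [this]
      simp only [hamGoA]
      rw [hset]
      dsimp only
      rw [if_neg hcont]
    have hB : isHamiltonianPathFromVertex_alt G visited curr = 1 := by
      unfold isHamiltonianPathFromVertex_alt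
      rw [hset]
      dsimp only
      rw [if_neg hcont]
    rw [hA, hB]
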